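-- pv_equiv track=rewrite | github.com/ultrasoundmoney/ofac-ethereum-addresses | main.py | generate_stats_table
-- ===== SOURCE A (Python) =====
-- def generate_stats_table(results):
--     """Generate stats table from results.
--
--     Returns:
--         str: Markdown table with name and address counts
--     """
--     name_counts = {}
--     for address, name in results:
--         name_counts[name] = name_counts.get(name, 0) + 1
--
--     sorted_names = sorted(name_counts.items())
--     total = len(results)
--
--     lines = [
--         "| sanctioned entity | count |",
--         "| :- | -: |"
--     ]
--     for name, count in sorted_names:
--         lines.append(f"| {name} | {count} |")
--     lines.append(f"| **total** | **{total}** |")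
--
--     return "\n".join(lines)
-- ===== SOURCE B (Python) =====
-- def generate_stats_table(results):
--     """Generate stats table from results.
--
--     Sort the names once, then emit one row per run of equal names
--     (no intermediate count dictionary).
--     """
--     names = sorted(name for _, name in results)
--     lines = [
--         "| sanctioned entity | count |",
--         "| :- | -: |"
--     ]
--     i = 0
--     n = len(names)
--     while i < n:
--         j = i + 1
--         while j < n and names[j] == names[i]:
--             j += 1
--         lines.append(f"| {names[i]} | {j - i} |")
--         i = j
--     lines.append(f"| **total** | **{len(results)}** |")
--     return "\n".join(lines)
-- ===== Notes on version B (the rewrite author's own statement) =====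
-- stated objective: alternative
-- what changed: Replaces the count-dictionary-then-sort-items strategy by a sort-then-group pass: sort the names once, then scan the sorted list emitting one row per run of equal names, with no intermediate count dictionary.
import Mathlib
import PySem

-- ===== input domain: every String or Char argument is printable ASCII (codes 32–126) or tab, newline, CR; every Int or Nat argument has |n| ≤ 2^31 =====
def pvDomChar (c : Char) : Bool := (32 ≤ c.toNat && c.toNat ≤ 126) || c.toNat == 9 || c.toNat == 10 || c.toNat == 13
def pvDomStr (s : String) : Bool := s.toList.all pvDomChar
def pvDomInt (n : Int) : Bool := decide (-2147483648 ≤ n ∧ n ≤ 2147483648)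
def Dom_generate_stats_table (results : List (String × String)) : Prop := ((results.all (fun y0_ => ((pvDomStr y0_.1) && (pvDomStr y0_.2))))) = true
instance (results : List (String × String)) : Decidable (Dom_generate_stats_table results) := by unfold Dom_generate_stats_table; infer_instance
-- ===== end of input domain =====

-- B replaces A's count-dictionary-then-sort-items strategy by sort-the-names-then-group-runs (alternative decomposition, same asymptotic cost).

-- ===== PORT A =====
def generate_stats_table (results : List (String × String)) : String :=
  let name_counts : PySem.Dict String Int :=
    results.foldl (fun d p => d.insert p.2 (d.getD p.2 0 + 1)) PySem.Dict.empty
  let sorted_names := PySem.List.sorted2 name_counts.items Prod.fst Prod.snd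
  let total : Int := (results.length : Int)
  let lines : List String := ["| sanctioned entity | count |", "| :- | -: |"]
  let lines := sorted_names.foldl
    (fun ls p => ls ++ ["| " ++ p.1 ++ " | " ++ PySem.Int.toStr p.2 ++ " |"]) lines
  let lines := lines ++ ["| **total** | **" ++ PySem.Int.toStr total ++ "** |"]
  PySem.Str.join "\n" lines

-- ===== PORT B =====
-- the inner while loop of Source B: one row per maximal run of equal names in the sorted list
def pvRunRows : List String → List String
  | [] => []
  | x :: xs =>
    ("| " ++ x ++ " | " ++ PySem.Int.toStr (1 + ((xs.takeWhile (fun y => y == x)).length : Int)) ++ " |")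
      :: pvRunRows (xs.dropWhile (fun y => y == x))
termination_by l => l.length
decreasing_by exact Nat.lt_succ_of_le (List.dropWhile_sublist _).length_le

def generate_stats_table_alt (results : List (String × String)) : String :=
  let names := PySem.List.sorted (results.map (fun p => p.2)) (fun x => x) false
  let lines : List String := ["| sanctioned entity | count |", "| :- | -: |"] ++ pvRunRows names
  let lines := lines ++ ["| **total** | **" ++ PySem.Int.toStr (results.length : Int) ++ "** |"]
  PySem.Str.join "\n" lines

-- ===== PRECONDITION & SPEC =====
def Spec_generate_stats_table (results : List (String × String)) (out : String) : Prop := out = generate_stats_table_alt results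
instance (results : List (String × String)) (out : String) : Decidable (Spec_generate_stats_table results out) := by unfold Spec_generate_stats_table; infer_instance

-- ===== CLAIM (what is proved, stated in full; the proofs are below) =====
def Claim_equal_generate_stats_table : Prop := ∀ (results : List (String × String)), Dom_generate_stats_table results → Spec_generate_stats_table results (generate_stats_table results)

-- ===== LEMMAS AND PROOFS =====

-- pvRuns: the (name, run-length) pairs pvRunRows renders
def pvRuns : List String → List (String × Int)
  | [] => []
  | x :: xs =>
    (x, 1 + ((xs.takeWhile (fun y => y == x)).length : Int)) :: pvRuns (xs.dropWhile (fun y => y == x))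
termination_by l => l.length
decreasing_by exact Nat.lt_succ_of_le (List.dropWhile_sublist _).length_le

theorem pvRunRows_eq_map (s : List String) :
    pvRunRows s = (pvRuns s).map (fun p => "| " ++ p.1 ++ " | " ++ PySem.Int.toStr p.2 ++ " |") := by
  induction s using pvRuns.induct with
  | case1 => simp [pvRunRows, pvRuns]
  | case2 x xs ih => simp [pvRunRows, pvRuns, ih]

theorem pv_foldl_append_map {α β : Type} (l : List α) (f : α → β) (init : List β) :
    l.foldl (fun ls x => ls ++ [f x]) init = init ++ l.map f := by
  induction l generalizing init with
  | nil => simp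
  | cons x t ih => simp [ih]

theorem pv_not_mem_dropWhile (x : String) (xs : List String)
    (hle : ∀ y ∈ xs, x ≤ y) (hpw : xs.Pairwise (· ≤ ·)) :
    x ∉ xs.dropWhile (fun y => y == x) := by
  induction xs with
  | nil => simp
  | cons a l ih =>
    by_cases hax : a = x
    · subst hax
      simp only [List.dropWhile_cons, beq_self_eq_true, if_true]
      exact ih (fun y hy => hle y (List.mem_cons_of_mem _ hy)) (List.pairwise_cons.mp hpw).2
    · rw [List.dropWhile_cons, if_neg (by simpa using hax)]
      intro hmem
      have hxa : x < a := lt_of_le_of_ne (hle a List.mem_cons_self) (Ne.symm hax)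
      rcases List.mem_cons.mp hmem with h | h
      · exact hax h.symm
      · exact absurd hxa (not_lt_of_ge ((List.pairwise_cons.mp hpw).1 x h))

theorem pvRuns_spec (s : List String) (h : s.Pairwise (· ≤ ·)) :
    ((pvRuns s).Pairwise (fun a b => a.1 < b.1)) ∧
    (∀ p ∈ pvRuns s, p.1 ∈ s ∧ p.2 = (s.count p.1 : Int)) ∧
    (∀ z ∈ s, z ∈ (pvRuns s).map Prod.fst) := by
  induction s using pvRuns.induct with
  | case1 => simp [pvRuns]
  | case2 x xs ih =>
    have hle : ∀ y ∈ xs, x ≤ y := (List.pairwise_cons.mp h).1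
    have hxs : xs.Pairwise (· ≤ ·) := (List.pairwise_cons.mp h).2
    have hd_pw : (xs.dropWhile (fun y => y == x)).Pairwise (· ≤ ·) :=
      List.Pairwise.sublist (List.dropWhile_sublist _) hxs
    have hx_nmem : x ∉ xs.dropWhile (fun y => y == x) := pv_not_mem_dropWhile x xs hle hxs
    obtain ⟨ih1, ih2, ih3⟩ := ih hd_pw
    have hsplit : xs = xs.takeWhile (fun y => y == x) ++ xs.dropWhile (fun y => y == x) :=
      (List.takeWhile_append_dropWhile).symm
    have ht_all : ∀ y ∈ xs.takeWhile (fun y => y == x), y = x := by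
      intro y hy
      have := List.mem_takeWhile_imp hy
      simpa using this
    have hmem_d : ∀ z ∈ xs.dropWhile (fun y => y == x), z ∈ xs :=
      fun z hz => (List.dropWhile_sublist _).mem hz
    have hne_d : ∀ z ∈ xs.dropWhile (fun y => y == x), z ≠ x := by
      intro z hz hzx; exact hx_nmem (hzx ▸ hz)
    have hcount_t : (xs.takeWhile (fun y => y == x)).count x = (xs.takeWhile (fun y => y == x)).length :=
      List.count_eq_length.mpr (fun b hb => (ht_all b hb).symm)
    have hcount_d : (xs.dropWhile (fun y => y == x)).count x = 0 :=
      List.count_eq_zero.mpr hx_nmem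
    refine ⟨?_, ?_, ?_⟩
    · rw [pvRuns]
      refine List.pairwise_cons.mpr ⟨?_, ih1⟩
      intro q hq
      have hq1 : q.1 ∈ xs.dropWhile (fun y => y == x) := (ih2 q hq).1
      exact lt_of_le_of_ne (hle q.1 (hmem_d _ hq1)) (Ne.symm (hne_d _ hq1))
    · rw [pvRuns]
      intro p hp
      rcases List.mem_cons.mp hp with hp | hp
      · subst hp
        refine ⟨List.mem_cons_self, ?_⟩
        have : (x :: xs).count x = 1 + (xs.takeWhile (fun y => y == x)).length := by
          rw [List.count_cons_self]
          conv_lhs => rw [hsplit]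
          rw [List.count_append, hcount_t, hcount_d]
          omega
        simp only [this]
        push_cast
        ring
      · obtain ⟨hp1, hp2⟩ := ih2 p hp
        refine ⟨List.mem_cons_of_mem _ (hmem_d _ hp1), ?_⟩
        have hne : p.1 ≠ x := hne_d _ hp1
        have hcount_t' : (xs.takeWhile (fun y => y == x)).count p.1 = 0 :=
          List.count_eq_zero.mpr (fun hc => hne (ht_all _ hc))
        have : (x :: xs).count p.1 = (xs.dropWhile (fun y => y == x)).count p.1 := by
          rw [List.count_cons_of_ne hne.symm]
          conv_lhs => rw [hsplit]
          rw [List.count_append, hcount_t']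
          omega
        rw [hp2, this]
    · intro z hz
      rcases List.mem_cons.mp hz with hz | hz
      · subst hz; rw [pvRuns]; simp
      · rw [hsplit] at hz
        rcases List.mem_append.mp hz with hz | hz
        · have := ht_all z hz; subst this; rw [pvRuns]; simp
        · rw [pvRuns]
          simpa using Or.inr (ih3 z hz)

theorem pv_insertBy_congr {α : Type} (b1 b2 : α → α → Bool) (x : α) (ys : List α)
    (h : ∀ y ∈ ys, b1 x y = b2 x y) :
    PySem.List.insertBy b1 x ys = PySem.List.insertBy b2 x ys := by
  induction ys with
  | nil => rfl
  | cons y t ih =>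
    simp only [PySem.List.insertBy]
    rw [h y List.mem_cons_self]
    split
    · rfl
    · have := ih (fun z hz => h z (List.mem_cons_of_mem _ hz))
      rw [this]

theorem pv_insertBy_perm {α : Type} (b : α → α → Bool) (x : α) (ys : List α) :
    (PySem.List.insertBy b x ys).Perm (x :: ys) := by
  induction ys with
  | nil => rfl
  | cons y t ih =>
    simp only [PySem.List.insertBy]
    split
    · rfl
    · have step : (y :: PySem.List.insertBy b x t).Perm (y :: x :: t) := List.Perm.cons y ih
      exact step.trans (List.Perm.swap x y t)

theorem pv_foldl_insertBy_congr {α κ : Type} [DecidableEq κ] (k1 : α → κ) (b1 b2 : α → α → Bool)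
    (h : ∀ x y, k1 x ≠ k1 y → b1 x y = b2 x y) :
    ∀ (l acc : List α), (((acc ++ l).map k1).Nodup) →
    l.foldl (fun a x => PySem.List.insertBy b1 x a) acc = l.foldl (fun a x => PySem.List.insertBy b2 x a) acc := by
  intro l
  induction l with
  | nil => intro acc _; rfl
  | cons x t ih =>
    intro acc hnd
    have hx_ne : ∀ y ∈ acc, k1 x ≠ k1 y := by
      intro y hy heq
      rw [List.map_append, List.nodup_append] at hnd
      exact hnd.2.2 (k1 y) (List.mem_map_of_mem hy) (k1 x) (List.mem_map_of_mem List.mem_cons_self) heq.symm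
    have hstep : PySem.List.insertBy b1 x acc = PySem.List.insertBy b2 x acc :=
      pv_insertBy_congr b1 b2 x acc (fun y hy => h x y (hx_ne y hy))
    simp only [List.foldl_cons, hstep]
    apply ih
    have hperm : ((PySem.List.insertBy b2 x acc ++ t).map k1).Perm (((acc ++ x :: t)).map k1) := by
      refine List.Perm.map k1 ?_
      exact ((pv_insertBy_perm b2 x acc).append_right t).trans List.perm_middle.symm
    exact hperm.nodup_iff.mpr hnd

-- on a list whose first components are pairwise distinct, Python's pair sort is the sort by first component
theorem pv_sorted2_eq_sorted_fst (l : List (String × Int)) (hnd : (l.map Prod.fst).Nodup) :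
    PySem.List.sorted2 l Prod.fst Prod.snd = PySem.List.sorted l Prod.fst false := by
  simp only [PySem.List.sorted2, PySem.List.sorted, Bool.false_eq_true, if_false]
  refine pv_foldl_insertBy_congr Prod.fst _ _ ?_ l [] (by simpa using hnd)
  intro x y hne
  rcases lt_or_gt_of_ne hne with hlt | hgt
  · simp [hlt, not_lt_of_gt hlt]
  · simp [hgt, not_lt_of_gt hgt]

theorem pv_main (results : List (String × String)) :
    generate_stats_table results = generate_stats_table_alt results := by
  simp only [generate_stats_table, generate_stats_table_alt]
  have hcounter : results.foldl (fun d p => d.insert p.2 (d.getD p.2 0 + 1)) PySem.Dict.empty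
      = PySem.Dict.counter (results.map (fun p => p.2)) := by
    rw [← PySem.Dict.foldl_insert_getD_add_one_eq_counter, List.foldl_map]
  rw [hcounter]
  set names := results.map (fun p => p.2) with hnames
  set s := PySem.List.sorted names (fun x => x) false with hs
  have hspw : s.Pairwise (· ≤ ·) := by
    have := PySem.List.sorted_pairwise names (fun x => x)
    simpa using this
  obtain ⟨h1, h2, h3⟩ := pvRuns_spec s hspw
  have hs_perm : s.Perm names := PySem.List.sorted_perm names (fun x => x) false
  -- the run list is exactly the counter's items, sorted by name
  have hnd_fst : ((pvRuns s).map Prod.fst).Nodup := by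
    have : ((pvRuns s).map Prod.fst).Pairwise (· < ·) := List.pairwise_map.mpr h1
    exact this.imp ne_of_lt
  have hmem_fst : ∀ z, z ∈ (pvRuns s).map Prod.fst ↔ z ∈ PySem.Set.ofList names := by
    intro z
    rw [PySem.Set.mem_ofList]
    constructor
    · intro hz
      obtain ⟨p, hp, hpz⟩ := List.mem_map.mp hz
      exact hs_perm.mem_iff.mp (hpz ▸ (h2 p hp).1)
    · intro hz
      exact h3 z (hs_perm.mem_iff.mpr hz)
  have hruns_eq : pvRuns s = ((pvRuns s).map Prod.fst).map (fun k => (k, (names.count k : Int))) := by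
    rw [List.map_map]
    symm
    calc (pvRuns s).map ((fun k => (k, (names.count k : Int))) ∘ Prod.fst)
        = (pvRuns s).map id := by
          apply List.map_congr_left
          intro p hp
          obtain ⟨hp1, hp2⟩ := h2 p hp
          have : s.count p.1 = names.count p.1 := hs_perm.count_eq p.1
          simp [← this, ← hp2]
      _ = pvRuns s := List.map_id _
  have hperm : (pvRuns s).Perm ((PySem.Dict.counter names).items) := by
    rw [PySem.Dict.items_counter, hruns_eq]
    refine List.Perm.map _ ?_
    exact (List.perm_ext_iff_of_nodup hnd_fst (PySem.Set.nodup_ofList names)).mpr hmem_fst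
  have hitems_nd : (((PySem.Dict.counter names).items).map Prod.fst).Nodup := by
    have hkeys : ((PySem.Dict.counter names).items).map Prod.fst = PySem.Set.ofList names := by
      rw [PySem.Dict.items_counter, List.map_map]
      simp [Function.comp_def]
    rw [hkeys]
    exact PySem.Set.nodup_ofList names
  have hsorted : PySem.List.sorted2 ((PySem.Dict.counter names).items) Prod.fst Prod.snd = pvRuns s := by
    rw [pv_sorted2_eq_sorted_fst _ hitems_nd]
    exact PySem.List.sorted_eq_of_perm_of_pairwise_lt _ _ Prod.fst hperm h1
  rw [hsorted, pv_foldl_append_map, ← pvRunRows_eq_map]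

-- ===== VERDICT (by name: the statement is the Claim_ definition above) =====
theorem generate_stats_table_spec : Claim_equal_generate_stats_table := by
  intro results _
  unfold Spec_generate_stats_table
  exact pv_main results
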